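-- pv_equiv track=rewrite | github.com/mxndr1/HIT137-DAN-EXT28 | Assignment_2/Q2/HIT137_DANEXT28_A2_Q2.py | calculate_largest_temp_range
-- ===== SOURCE A (Python) =====
-- def calculate_largest_temp_range(all_temps_per_station):
--     """
--     Calculates the largest temperature range for each station and returns a dictionary with the results
--     """
--
--     # The maximum temperature, minimum temperature, and the range between those values for each station is calculated and added to a dictionary
--     station_ranges = {}
--     max_range = None
--
--     for station, temps in all_temps_per_station.items():
--         temp_range = max(temps) - min(temps)
--         station_ranges[station] = {
--             'range': temp_range,
--             'min': min(temps),
--             'max': max(temps)}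
--
--         if (max_range is None) or (temp_range > max_range):
--             max_range = temp_range
--
--     # The ranges from the previous dictionary are compared to find the stations with the largest temperature range
--     # and a new dictionary is created to store these stations and their temperature ranges
--     highest_ranges_dict = {}
--     for station, minmaxrange in station_ranges.items():
--         if minmaxrange['range'] == max_range:
--             highest_ranges_dict[station] = {
--                 'range': minmaxrange['range'],
--                 'max': minmaxrange['max'],
--                 'min': minmaxrange['min']}
--
--     # Returns the dictionary containing the stations with the largest temperature range
--     return highest_ranges_dict
-- ===== SOURCE B (Python) =====
-- def calculate_largest_temp_range(all_temps_per_station):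
--     """
--     Calculates the largest temperature range for each station and returns a dictionary with the results
--     """
--     # Single pass: keep the best range seen so far and the dict of current winners;
--     # reset the winners whenever a strictly larger range appears.
--     best = None
--     winners = {}
--     for station, temps in all_temps_per_station.items():
--         mn = min(temps)
--         mx = max(temps)
--         r = mx - mn
--         if best is None or r > best:
--             best = r
--             winners = {station: {'range': r, 'max': mx, 'min': mn}}
--         elif r == best:
--             winners[station] = {'range': r, 'max': mx, 'min': mn}
--     return winners
-- ===== Notes on version B (the rewrite author's own statement) =====
-- stated objective: faster
-- what changed: B replaces A's two-phase scheme (build a station->stats dict with four min/max scans per station while tracking the max range, then a second filtering loop) with a single online pass that keeps the current best range and the dict of current winners, resetting the winners whenever a strictly larger range appears; one min and one max scan per station.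
-- outside the precondition, e.g. on calculate_largest_temp_range({'x': []}): A raises ValueError, B raises ValueError
import Mathlib
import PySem

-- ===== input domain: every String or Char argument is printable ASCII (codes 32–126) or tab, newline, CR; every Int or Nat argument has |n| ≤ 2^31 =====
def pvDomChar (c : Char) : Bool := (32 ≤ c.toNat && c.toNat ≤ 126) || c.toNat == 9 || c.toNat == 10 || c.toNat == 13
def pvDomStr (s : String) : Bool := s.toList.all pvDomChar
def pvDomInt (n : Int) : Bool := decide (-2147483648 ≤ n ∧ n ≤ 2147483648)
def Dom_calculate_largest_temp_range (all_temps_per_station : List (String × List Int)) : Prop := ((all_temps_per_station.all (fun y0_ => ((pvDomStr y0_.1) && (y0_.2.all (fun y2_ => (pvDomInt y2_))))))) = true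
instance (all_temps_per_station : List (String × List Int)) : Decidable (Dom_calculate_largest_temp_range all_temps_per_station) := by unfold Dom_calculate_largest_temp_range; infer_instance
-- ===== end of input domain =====

-- B does one online pass (current best range + current winners dict, reset on a strictly larger range; one min and one max scan
-- per station) instead of A's stats-dict-then-filter two-phase scheme with four scans per station; same return value on Pre_.


-- ===== PORT A =====
-- max(temps)/min(temps) are ported with PySem.List.max?/min?; `.getD 0` is never used under
-- Pre_ (temps nonempty), where Python raises ValueError.
def calculate_largest_temp_range (all_temps_per_station : List (String × List Int)) : List (String × List (String × Int)) :=
  let step1 := all_temps_per_station.foldl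
    (fun (acc : PySem.Dict String (PySem.Dict String Int) × Option Int) p =>
      let temps := p.2
      let temp_range := (PySem.List.max? temps (fun x => x)).getD 0 - (PySem.List.min? temps (fun x => x)).getD 0
      let station_ranges := acc.1.insert p.1 (PySem.Dict.ofList
        [("range", temp_range),
         ("min", (PySem.List.min? temps (fun x => x)).getD 0),
         ("max", (PySem.List.max? temps (fun x => x)).getD 0)])
      let max_range := match acc.2 with
        | none => some temp_range
        | some m => if temp_range > m then some temp_range else some m
      (station_ranges, max_range))
    (PySem.Dict.empty, none)
  let station_ranges := step1.1
  let max_range := step1.2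
  let highest_ranges_dict := station_ranges.items.foldl
    (fun (h : PySem.Dict String (PySem.Dict String Int)) q =>
      -- `minmaxrange['range'] == max_range`: the key is always present, `.getD _ 0` is exact here
      if some (q.2.getD "range" 0) = max_range then
        h.insert q.1 (PySem.Dict.ofList
          [("range", q.2.getD "range" 0),
           ("max", q.2.getD "max" 0),
           ("min", q.2.getD "min" 0)])
      else h)
    PySem.Dict.empty
  highest_ranges_dict.items.map (fun q => (q.1, q.2.items))

-- ===== PORT B =====
def calculate_largest_temp_range_alt (all_temps_per_station : List (String × List Int)) : List (String × List (String × Int)) :=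
  let res := all_temps_per_station.foldl
    (fun (acc : Option Int × PySem.Dict String (PySem.Dict String Int)) p =>
      let mn := (PySem.List.min? p.2 (fun x => x)).getD 0
      let mx := (PySem.List.max? p.2 (fun x => x)).getD 0
      let r := mx - mn
      match acc.1 with
      | none => (some r, PySem.Dict.empty.insert p.1
          (PySem.Dict.ofList [("range", r), ("max", mx), ("min", mn)]))
      | some b =>
        if r > b then (some r, PySem.Dict.empty.insert p.1
          (PySem.Dict.ofList [("range", r), ("max", mx), ("min", mn)]))
        else if r = b then (acc.1, acc.2.insert p.1
          (PySem.Dict.ofList [("range", r), ("max", mx), ("min", mn)]))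
        else acc)
    (none, PySem.Dict.empty)
  res.2.items.map (fun q => (q.1, q.2.items))

-- ===== PRECONDITION & SPEC =====
-- Pre_ excludes (a) stations with an empty temperature list, on which A raises ValueError, and
-- (b) association lists with duplicate station keys, which a Python dict (A's actual input type)
-- cannot contain — they are an artefact of the list encoding.
def Pre_calculate_largest_temp_range (all_temps_per_station : List (String × List Int)) : Prop :=
  (all_temps_per_station.map (·.1)).Nodup ∧ ∀ p ∈ all_temps_per_station, p.2 ≠ []
instance (all_temps_per_station : List (String × List Int)) : Decidable (Pre_calculate_largest_temp_range all_temps_per_station) := by unfold Pre_calculate_largest_temp_range; infer_instance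

def pvWitness_calculate_largest_temp_range : (List (String × List Int)) :=
  [("a", [1, 5]), ("b", [0, 4]), ("c", [2, 2])]

def Spec_calculate_largest_temp_range (all_temps_per_station : List (String × List Int)) (out : List (String × List (String × Int))) : Prop := out = calculate_largest_temp_range_alt all_temps_per_station
instance (all_temps_per_station : List (String × List Int)) (out : List (String × List (String × Int))) : Decidable (Spec_calculate_largest_temp_range all_temps_per_station out) := by unfold Spec_calculate_largest_temp_range; infer_instance

-- ===== CLAIM (what is proved, stated in full; the proofs are below) =====
def Claim_equal_calculate_largest_temp_range : Prop := ∀ (all_temps_per_station : List (String × List Int)), Dom_calculate_largest_temp_range all_temps_per_station → Pre_calculate_largest_temp_range all_temps_per_station → Spec_calculate_largest_temp_range all_temps_per_station (calculate_largest_temp_range all_temps_per_station)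

-- ===== LEMMAS AND PROOFS =====

-- shared station statistics
def pvMn (p : String × List Int) : Int := (PySem.List.min? p.2 (fun x => x)).getD 0
def pvMx (p : String × List Int) : Int := (PySem.List.max? p.2 (fun x => x)).getD 0
def pvRng (p : String × List Int) : Int := pvMx p - pvMn p
def pvEntry (p : String × List Int) : PySem.Dict String Int :=
  PySem.Dict.ofList [("range", pvRng p), ("max", pvMx p), ("min", pvMn p)]
def pvEntryA (p : String × List Int) : PySem.Dict String Int :=
  PySem.Dict.ofList [("range", pvRng p), ("min", pvMn p), ("max", pvMx p)]
-- running maximum of the ranges (shape of A's max_range update and B's best update)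
def pvFMax (l : List (String × List Int)) (b : Int) : Int :=
  l.foldl (fun m p => if pvRng p > m then pvRng p else m) b


-- step functions of the two ports (definitionally equal to the inline lambdas of the ports)
def pvStepA (acc : PySem.Dict String (PySem.Dict String Int) × Option Int) (p : String × List Int) :
    PySem.Dict String (PySem.Dict String Int) × Option Int :=
  let temps := p.2
  let temp_range := (PySem.List.max? temps (fun x => x)).getD 0 - (PySem.List.min? temps (fun x => x)).getD 0
  let station_ranges := acc.1.insert p.1 (PySem.Dict.ofList
    [("range", temp_range),
     ("min", (PySem.List.min? temps (fun x => x)).getD 0),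
     ("max", (PySem.List.max? temps (fun x => x)).getD 0)])
  let max_range := match acc.2 with
    | none => some temp_range
    | some m => if temp_range > m then some temp_range else some m
  (station_ranges, max_range)

def pvStepA2 (mr : Option Int) (h : PySem.Dict String (PySem.Dict String Int))
    (q : String × PySem.Dict String Int) : PySem.Dict String (PySem.Dict String Int) :=
  if some (q.2.getD "range" 0) = mr then
    h.insert q.1 (PySem.Dict.ofList
      [("range", q.2.getD "range" 0),
       ("max", q.2.getD "max" 0),
       ("min", q.2.getD "min" 0)])
  else h

def pvStepB (acc : Option Int × PySem.Dict String (PySem.Dict String Int)) (p : String × List Int) :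
    Option Int × PySem.Dict String (PySem.Dict String Int) :=
  let mn := (PySem.List.min? p.2 (fun x => x)).getD 0
  let mx := (PySem.List.max? p.2 (fun x => x)).getD 0
  let r := mx - mn
  match acc.1 with
  | none => (some r, PySem.Dict.empty.insert p.1
      (PySem.Dict.ofList [("range", r), ("max", mx), ("min", mn)]))
  | some b =>
    if r > b then (some r, PySem.Dict.empty.insert p.1
      (PySem.Dict.ofList [("range", r), ("max", mx), ("min", mn)]))
    else if r = b then (acc.1, acc.2.insert p.1
      (PySem.Dict.ofList [("range", r), ("max", mx), ("min", mn)]))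
    else acc

lemma portA_eq (l : List (String × List Int)) :
    calculate_largest_temp_range l =
      ((l.foldl pvStepA (PySem.Dict.empty, none)).1.items.foldl
        (pvStepA2 (l.foldl pvStepA (PySem.Dict.empty, none)).2) PySem.Dict.empty).items.map
        (fun q => (q.1, q.2.items)) := rfl

lemma portB_eq (l : List (String × List Int)) :
    calculate_largest_temp_range_alt l =
      (l.foldl pvStepB (none, PySem.Dict.empty)).2.items.map (fun q => (q.1, q.2.items)) := rfl

-- the option-valued running maximum A's max_range follows
def pvFMaxO (l : List (String × List Int)) (m : Option Int) : Option Int :=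
  l.foldl (fun m p => match m with
    | none => some (pvRng p)
    | some b => if pvRng p > b then some (pvRng p) else some b) m

lemma foldA_snd (l : List (String × List Int)) (d : PySem.Dict String (PySem.Dict String Int))
    (m : Option Int) : (l.foldl pvStepA (d, m)).2 = pvFMaxO l m := by
  induction l generalizing d m with
  | nil => rfl
  | cons p t ih =>
    rw [List.foldl_cons, ih]
    rfl

lemma pvFMaxO_some (l : List (String × List Int)) (b : Int) :
    pvFMaxO l (some b) = some (pvFMax l b) := by
  induction l generalizing b with
  | nil => rfl
  | cons p t ih =>
    show pvFMaxO t (if pvRng p > b then some (pvRng p) else some b) = some (pvFMax t (if pvRng p > b then pvRng p else b))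
    split <;> rw [ih]

lemma pvFMax_le (l : List (String × List Int)) (b : Int) : b ≤ pvFMax l b := by
  induction l generalizing b with
  | nil => simp [pvFMax]
  | cons p t ih =>
    show b ≤ pvFMax t (if pvRng p > b then pvRng p else b)
    by_cases h : pvRng p > b
    · simp only [if_pos h]; exact le_trans (le_of_lt h) (ih _)
    · simp only [if_neg h]; exact ih b

lemma foldA_fst (l : List (String × List Int)) (d : PySem.Dict String (PySem.Dict String Int))
    (m : Option Int) (hf : ∀ p ∈ l, d.contains p.1 = false) (hn : (l.map (·.1)).Nodup) :
    (l.foldl pvStepA (d, m)).1.items = d.items ++ l.map (fun p => (p.1, pvEntryA p)) := by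
  induction l generalizing d m with
  | nil => simp
  | cons p t ih =>
    simp only [List.map_cons, List.nodup_cons] at hn
    have hp : d.contains p.1 = false := hf p (List.mem_cons_self)
    have hf' : ∀ q ∈ t, (d.insert p.1 (pvEntryA p)).contains q.1 = false := by
      intro q hq
      rw [PySem.Dict.contains_insert]
      have hne : q.1 ≠ p.1 := fun e => hn.1 (e ▸ List.mem_map_of_mem hq)
      simp [hne, hf q (List.mem_cons_of_mem _ hq)]
    rw [List.foldl_cons,
        show pvStepA (d, m) p = (d.insert p.1 (pvEntryA p), (pvStepA (d, m) p).2) from rfl,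
        ih _ _ hf' hn.2, PySem.Dict.items_insert_of_not_contains _ _ hp]
    simp

def pvOut (q : String × PySem.Dict String Int) : PySem.Dict String Int :=
  PySem.Dict.ofList
    [("range", q.2.getD "range" 0),
     ("max", q.2.getD "max" 0),
     ("min", q.2.getD "min" 0)]

lemma foldA2_items (I : List (String × PySem.Dict String Int)) (mr : Option Int)
    (h : PySem.Dict String (PySem.Dict String Int))
    (hf : ∀ q ∈ I, h.contains q.1 = false) (hn : (I.map (·.1)).Nodup) :
    (I.foldl (pvStepA2 mr) h).items =
      h.items ++ (I.filter (fun q => decide (some (q.2.getD "range" 0) = mr))).map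
        (fun q => (q.1, pvOut q)) := by
  induction I generalizing h with
  | nil => simp
  | cons q t ih =>
    simp only [List.map_cons, List.nodup_cons] at hn
    have hq : h.contains q.1 = false := hf q (List.mem_cons_self)
    rw [List.foldl_cons]
    by_cases hc : some (q.2.getD "range" 0) = mr
    · have hf' : ∀ r ∈ t, (h.insert q.1 (pvOut q)).contains r.1 = false := by
        intro r hr
        rw [PySem.Dict.contains_insert]
        have hne : r.1 ≠ q.1 := fun e => hn.1 (e ▸ List.mem_map_of_mem hr)
        simp [hne, hf r (List.mem_cons_of_mem _ hr)]
      rw [show pvStepA2 mr h q = h.insert q.1 (pvOut q) from by simp [pvStepA2, hc, pvOut],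
          ih _ hf' hn.2, PySem.Dict.items_insert_of_not_contains _ _ hq]
      simp [hc]
    · rw [show pvStepA2 mr h q = h from by simp [pvStepA2, hc],
          ih _ (fun r hr => hf r (List.mem_cons_of_mem _ hr)) hn.2]
      simp [hc]

lemma foldB_items (t : List (String × List Int)) (b : Int)
    (d : PySem.Dict String (PySem.Dict String Int)) (hk : d.keys.Nodup)
    (hf : ∀ p ∈ t, d.contains p.1 = false) (hn : (t.map (·.1)).Nodup) :
    (t.foldl pvStepB (some b, d)).2.items =
      if pvFMax t b = b then
        d.items ++ (t.filter (fun p => decide (pvRng p = b))).map (fun p => (p.1, pvEntry p))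
      else (t.filter (fun p => decide (pvRng p = pvFMax t b))).map (fun p => (p.1, pvEntry p)) := by
  induction t generalizing b d with
  | nil => simp [pvFMax]
  | cons p t ih =>
    simp only [List.map_cons, List.nodup_cons] at hn
    rw [List.foldl_cons]
    have hstep : pvStepB (some b, d) p =
        (if pvRng p > b then (some (pvRng p), PySem.Dict.empty.insert p.1 (pvEntry p))
         else if pvRng p = b then (some b, d.insert p.1 (pvEntry p)) else (some b, d)) := rfl
    have hMax : pvFMax (p :: t) b = pvFMax t (if pvRng p > b then pvRng p else b) := rfl
    have hle := pvFMax_le t b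
    by_cases h1 : pvRng p > b
    · have hf' : ∀ q ∈ t, (PySem.Dict.empty.insert p.1 (pvEntry p)).contains q.1 = false := by
        intro q hq
        rw [PySem.Dict.contains_insert]
        have hne : q.1 ≠ p.1 := fun e => hn.1 (e ▸ List.mem_map_of_mem hq)
        simp [hne]
      have hk' : (PySem.Dict.empty.insert p.1 (pvEntry p)).keys.Nodup := by
        rw [PySem.Dict.keys_insert_of_not_contains _ _ (by simp)]
        simp
      rw [hstep, if_pos h1, ih _ _ hk' hf' hn.2]
      have hle' := pvFMax_le t (pvRng p)
      have hbig : ¬ pvFMax (p :: t) b = b := by rw [hMax, if_pos h1]; omega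
      rw [if_neg hbig]
      simp only [hMax, if_pos h1]
      by_cases h2 : pvFMax t (pvRng p) = pvRng p
      · rw [if_pos h2, PySem.Dict.items_insert_of_not_contains _ _ (by simp)]
        simp [h2, PySem.Dict.empty]
      · rw [if_neg h2]
        have hne : ¬ (pvRng p = pvFMax t (pvRng p)) := fun e => h2 e.symm
        simp [hne]
    · by_cases h2 : pvRng p = b
      · have hp : d.contains p.1 = false := hf p (List.mem_cons_self)
        have hf' : ∀ q ∈ t, (d.insert p.1 (pvEntry p)).contains q.1 = false := by
          intro q hq
          rw [PySem.Dict.contains_insert]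
          have hne : q.1 ≠ p.1 := fun e => hn.1 (e ▸ List.mem_map_of_mem hq)
          simp [hne, hf q (List.mem_cons_of_mem _ hq)]
        rw [hstep, if_neg h1, if_pos h2,
            ih _ _ (PySem.Dict.nodup_keys_insert _ _ _ hk) hf' hn.2]
        simp only [hMax, if_neg h1]
        by_cases h3 : pvFMax t b = b
        · rw [if_pos h3, if_pos h3, PySem.Dict.items_insert_of_not_contains _ _ hp]
          simp [h2]
        · rw [if_neg h3, if_neg h3]
          have hne : ¬ (pvRng p = pvFMax t b) := by omega
          simp [hne]
      · rw [hstep, if_neg h1, if_neg h2,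
            ih _ _ hk (fun q hq => hf q (List.mem_cons_of_mem _ hq)) hn.2]
        simp only [hMax, if_neg h1]
        by_cases h3 : pvFMax t b = b
        · rw [if_pos h3, if_pos h3]
          simp [h2]
        · rw [if_neg h3, if_neg h3]
          have hne : ¬ (pvRng p = pvFMax t b) := by omega
          simp [hne]

lemma pvEntryA_range (q : String × List Int) : (pvEntryA q).getD "range" 0 = pvRng q := rfl
lemma pvOut_entryA (q : String × List Int) : pvOut (q.1, pvEntryA q) = pvEntry q := rfl

lemma portA_closed (p : String × List Int) (t : List (String × List Int))
    (hnd : ((p :: t).map (·.1)).Nodup) :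
    calculate_largest_temp_range (p :: t) =
      ((p :: t).filter (fun q => decide (pvRng q = pvFMax t (pvRng p)))).map
        (fun q => (q.1, (pvEntry q).items)) := by
  rw [portA_eq]
  have hsnd : ((p :: t).foldl pvStepA (PySem.Dict.empty, none)).2 = some (pvFMax t (pvRng p)) := by
    rw [foldA_snd]
    exact pvFMaxO_some t (pvRng p)
  have hfst : ((p :: t).foldl pvStepA (PySem.Dict.empty, none)).1.items =
      (p :: t).map (fun p => (p.1, pvEntryA p)) := by
    rw [foldA_fst (p :: t) PySem.Dict.empty none (by simp) hnd]; rfl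
  have hnod2 : (((p :: t).map (fun p => (p.1, pvEntryA p))).map (·.1)).Nodup := by
    rw [List.map_map]; exact hnd
  have hpred : (fun (q : String × PySem.Dict String Int) =>
        decide (some (q.2.getD "range" 0) = some (pvFMax t (pvRng p)))) ∘
        (fun (q : String × List Int) => (q.1, pvEntryA q)) =
      fun q => decide (pvRng q = pvFMax t (pvRng p)) := by
    funext q
    simp [Function.comp, pvEntryA_range]
  rw [hsnd, hfst, foldA2_items _ _ _ (by simp) hnod2, List.filter_map, hpred]
  simp [List.map_map, Function.comp, pvOut_entryA, PySem.Dict.empty]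

lemma portB_closed (p : String × List Int) (t : List (String × List Int))
    (hnd : ((p :: t).map (·.1)).Nodup) :
    calculate_largest_temp_range_alt (p :: t) =
      ((p :: t).filter (fun q => decide (pvRng q = pvFMax t (pvRng p)))).map
        (fun q => (q.1, (pvEntry q).items)) := by
  rw [portB_eq]
  simp only [List.map_cons, List.nodup_cons] at hnd
  rw [List.foldl_cons,
      show pvStepB (none, PySem.Dict.empty) p =
        (some (pvRng p), PySem.Dict.empty.insert p.1 (pvEntry p)) from rfl]
  have hf' : ∀ q ∈ t, (PySem.Dict.empty.insert p.1 (pvEntry p)).contains q.1 = false := by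
    intro q hq
    rw [PySem.Dict.contains_insert]
    have hne : q.1 ≠ p.1 := fun e => hnd.1 (e ▸ List.mem_map_of_mem hq)
    simp [hne]
  have hk' : (PySem.Dict.empty.insert p.1 (pvEntry p)).keys.Nodup := by
    rw [PySem.Dict.keys_insert_of_not_contains _ _ (by simp)]
    simp
  rw [foldB_items t (pvRng p) _ hk' hf' hnd.2]
  have hle := pvFMax_le t (pvRng p)
  by_cases h2 : pvFMax t (pvRng p) = pvRng p
  · rw [if_pos h2, PySem.Dict.items_insert_of_not_contains _ _ (by simp)]
    simp [h2, PySem.Dict.empty]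
  · rw [if_neg h2]
    have hne : ¬ (pvRng p = pvFMax t (pvRng p)) := fun e => h2 e.symm
    simp [hne]

theorem calculate_largest_temp_range_spec : Claim_equal_calculate_largest_temp_range := by
  intro l _ hpre
  show calculate_largest_temp_range l = calculate_largest_temp_range_alt l
  cases l with
  | nil => rfl
  | cons p t => rw [portA_closed p t hpre.1, portB_closed p t hpre.1]
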